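-- pv_equiv track=rewrite | github.com/WenqingYan/Python_beginner | huawei/#20_Passwordcheck.py | check3in4
-- ===== SOURCE A (Python) =====
-- def check3in4(s):
--     l = [0]*4
--     for i in s:
--         if i.islower():
--             l[0] = 1
--         elif i.isupper():
--             l[1] = 1
--         elif i.isdigit():
--             l[2] = 1
--         else:
--             l[3] = 1
--     if sum(l) >= 3:
--         return 1
--     else:
--         return 0
-- ===== SOURCE B (Python) =====
-- def check3in4(s):
--     cats = [
--         any(c.islower() for c in s),
--         any(c.isupper() for c in s),
--         any(c.isdigit() for c in s),
--         any(not (c.islower() or c.isupper() or c.isdigit()) for c in s),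
--     ]
--     return 1 if sum(cats) >= 3 else 0
-- ===== Notes on version B (the rewrite author's own statement) =====
-- stated objective: simpler
-- what changed: Replaced the single loop that mutates a 4-slot flag list with four independent any() presence scans whose true-count decides the result.
import Mathlib
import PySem

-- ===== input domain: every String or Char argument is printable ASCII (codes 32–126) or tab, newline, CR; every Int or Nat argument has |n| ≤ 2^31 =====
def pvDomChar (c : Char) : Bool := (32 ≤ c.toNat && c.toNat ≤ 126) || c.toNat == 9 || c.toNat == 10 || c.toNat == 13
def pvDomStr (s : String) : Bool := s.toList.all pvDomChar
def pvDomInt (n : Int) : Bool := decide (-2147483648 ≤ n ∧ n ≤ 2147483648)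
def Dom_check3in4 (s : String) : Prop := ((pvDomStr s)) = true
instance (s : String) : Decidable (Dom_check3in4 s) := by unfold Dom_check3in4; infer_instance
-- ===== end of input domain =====

-- B replaces A's single flag-mutating loop by four independent presence scans; objective: simpler.


-- ===== PORT A =====
-- the 4-slot list l is carried as a 4-tuple of Ints; each branch sets its slot to 1
def check3in4Step (l : Int × Int × Int × Int) (i : Char) : Int × Int × Int × Int :=
  if PySem.Chars.islower i then (1, l.2.1, l.2.2.1, l.2.2.2)
  else if PySem.Chars.isupper i then (l.1, 1, l.2.2.1, l.2.2.2)
  else if PySem.Chars.isdigit i then (l.1, l.2.1, 1, l.2.2.2)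
  else (l.1, l.2.1, l.2.2.1, 1)

def check3in4 (s : String) : Int :=
  let l := s.toList.foldl check3in4Step (0, 0, 0, 0)
  if l.1 + l.2.1 + l.2.2.1 + l.2.2.2 ≥ 3 then 1 else 0

-- ===== PORT B =====
def check3in4_alt (s : String) : Int :=
  let cats : List Bool :=
    [ s.toList.any (fun c => PySem.Chars.islower c)
    , s.toList.any (fun c => PySem.Chars.isupper c)
    , s.toList.any (fun c => PySem.Chars.isdigit c)
    , s.toList.any (fun c => !(PySem.Chars.islower c || PySem.Chars.isupper c || PySem.Chars.isdigit c)) ]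
  if (cats.map (fun b => if b then (1 : Int) else 0)).sum ≥ 3 then 1 else 0

-- ===== PRECONDITION & SPEC =====
def Spec_check3in4 (s : String) (out : Int) : Prop := out = check3in4_alt s
instance (s : String) (out : Int) : Decidable (Spec_check3in4 s out) := by unfold Spec_check3in4; infer_instance

-- ===== CLAIM (what is proved, stated in full; the proofs are below) =====
def Claim_equal_check3in4 : Prop := ∀ (s : String), Dom_check3in4 s → Spec_check3in4 s (check3in4 s)

-- ===== LEMMAS AND PROOFS =====
def pvB2I (b : Bool) : Int := if b then 1 else 0

theorem pvLowNotUp (c : Char) (h : PySem.Chars.islower c = true) : PySem.Chars.isupper c = false := by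
  simp only [PySem.Chars.islower, PySem.Chars.isupper, Bool.and_eq_true, decide_eq_true_eq,
    Bool.and_eq_false_iff, decide_eq_false_iff_not, Char.le_def, UInt32.le_iff_toNat_le] at h ⊢
  have h1 : 'a'.val.toNat = 97 := rfl
  have h2 : 'Z'.val.toNat = 90 := rfl
  omega

theorem pvLowNotDig (c : Char) (h : PySem.Chars.islower c = true) : PySem.Chars.isdigit c = false := by
  simp only [PySem.Chars.islower, PySem.Chars.isdigit, Bool.and_eq_true, decide_eq_true_eq,
    Bool.and_eq_false_iff, decide_eq_false_iff_not, Char.le_def, UInt32.le_iff_toNat_le] at h ⊢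
  have h1 : 'a'.val.toNat = 97 := rfl
  have h2 : '9'.val.toNat = 57 := rfl
  omega

theorem pvUpNotDig (c : Char) (h : PySem.Chars.isupper c = true) : PySem.Chars.isdigit c = false := by
  simp only [PySem.Chars.isupper, PySem.Chars.isdigit, Bool.and_eq_true, decide_eq_true_eq,
    Bool.and_eq_false_iff, decide_eq_false_iff_not, Char.le_def, UInt32.le_iff_toNat_le] at h ⊢
  have h1 : 'A'.val.toNat = 65 := rfl
  have h2 : '9'.val.toNat = 57 := rfl
  omega

theorem check3in4_fold_eq (cs : List Char) (a b c d : Bool) :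
    cs.foldl check3in4Step (pvB2I a, pvB2I b, pvB2I c, pvB2I d) =
      (pvB2I (a || cs.any (fun x => PySem.Chars.islower x)),
       pvB2I (b || cs.any (fun x => PySem.Chars.isupper x)),
       pvB2I (c || cs.any (fun x => PySem.Chars.isdigit x)),
       pvB2I (d || cs.any (fun x => !(PySem.Chars.islower x || PySem.Chars.isupper x || PySem.Chars.isdigit x)))) := by
  induction cs generalizing a b c d with
  | nil => simp
  | cons x xs ih =>
    simp only [List.foldl_cons, List.any_cons, check3in4Step]
    by_cases h1 : PySem.Chars.islower x
    · simpa [h1, pvLowNotUp x h1, pvLowNotDig x h1, pvB2I] using ih true b c d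
    · by_cases h2 : PySem.Chars.isupper x
      · simpa [h1, h2, pvUpNotDig x h2, pvB2I] using ih a true c d
      · by_cases h3 : PySem.Chars.isdigit x
        · simpa [h1, h2, h3, pvB2I] using ih a b true d
        · simpa [h1, h2, h3, pvB2I] using ih a b c true

-- ===== VERDICT (by name: the statement is the Claim_ definition above) =====
theorem check3in4_spec : Claim_equal_check3in4 := by
  intro s _
  unfold Spec_check3in4 check3in4 check3in4_alt
  rcases hl : s.toList.any (fun x => PySem.Chars.islower x) <;>
  rcases hu : s.toList.any (fun x => PySem.Chars.isupper x) <;>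
  rcases hd : s.toList.any (fun x => PySem.Chars.isdigit x) <;>
  rcases ho : s.toList.any (fun x => !(PySem.Chars.islower x || PySem.Chars.isupper x || PySem.Chars.isdigit x)) <;>
  · have h := check3in4_fold_eq s.toList false false false false
    simp only [pvB2I, Bool.false_or, hl, hu, hd, ho] at h
    norm_num at h ⊢
    simp [h]
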